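-- pv_equiv track=rewrite | github.com/varshinees/gnlp-final-project | question_analysis.py | generate_question_counts
-- ===== SOURCE A (Python) =====
-- def generate_question_counts(annotations, colors=None):
--     question_types = {}
--     COLORS = ['#e6194B', '#3cb44b', '#ffe119', '#4363d8', '#f58231', '#911eb4', '#42d4f4', '#f032e6',
--               '#bfef45', '#fabed4', '#469990', '#dcbeff', '#9A6324', '#fffac8', '#800000', '#aaffc3',
--               '#808000', '#ffd8b1', '#000075', '#a9a9a9', '#ffffff', '#000000']
--     color_index = 0
--     for annotation in annotations:
--         if annotation['question_type'] in question_types: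
--             count = question_types[annotation['question_type']][0]
--             color = question_types[annotation['question_type']][1]
--             question_types[annotation['question_type']] = (count + 1, color)
--         elif colors is None or annotation['question_type'] not in colors:
--             # assign a random color
--             rand_color = COLORS[color_index]
--             question_types[annotation['question_type']] = (1, rand_color)
--             color_index = (color_index + 1) % len(COLORS)
--         else:
--             # get color from colors dict
--             question_types[annotation['question_type']] = (1, colors[annotation['question_type']][1])
--
--     return question_types
-- ===== SOURCE B (Python) =====
-- def generate_question_counts(annotations, colors=None):
--     COLORS = ['#e6194B', '#3cb44b', '#ffe119', '#4363d8', '#f58231', '#911eb4', '#42d4f4', '#f032e6',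
--               '#bfef45', '#fabed4', '#469990', '#dcbeff', '#9A6324', '#fffac8', '#800000', '#aaffc3',
--               '#808000', '#ffd8b1', '#000075', '#a9a9a9', '#ffffff', '#000000']
--     annotations = list(annotations)
--     # pass 1: count each question type (dict keeps first-appearance order)
--     counts = {}
--     for annotation in annotations:
--         qt = annotation['question_type']
--         counts[qt] = counts.get(qt, 0) + 1
--     # pass 2: assign one color per distinct type, in first-appearance order
--     color_of = {}
--     color_index = 0
--     for qt in counts:
--         if colors is None or qt not in colors:
--             color_of[qt] = COLORS[color_index]
--             color_index = (color_index + 1) % len(COLORS)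
--         else:
--             color_of[qt] = colors[qt][1]
--     return {qt: (n, color_of[qt]) for qt, n in counts.items()}
-- ===== Notes on version B (the rewrite author's own statement) =====
-- stated objective: alternative
-- what changed: A interleaves counting and color assignment in one loop with a mixed (count,color) dict; B makes two separate passes - first a plain counting dict over the annotations, then one color-assignment loop over the distinct question types in first-appearance order - and zips them into the result.
import Mathlib
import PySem

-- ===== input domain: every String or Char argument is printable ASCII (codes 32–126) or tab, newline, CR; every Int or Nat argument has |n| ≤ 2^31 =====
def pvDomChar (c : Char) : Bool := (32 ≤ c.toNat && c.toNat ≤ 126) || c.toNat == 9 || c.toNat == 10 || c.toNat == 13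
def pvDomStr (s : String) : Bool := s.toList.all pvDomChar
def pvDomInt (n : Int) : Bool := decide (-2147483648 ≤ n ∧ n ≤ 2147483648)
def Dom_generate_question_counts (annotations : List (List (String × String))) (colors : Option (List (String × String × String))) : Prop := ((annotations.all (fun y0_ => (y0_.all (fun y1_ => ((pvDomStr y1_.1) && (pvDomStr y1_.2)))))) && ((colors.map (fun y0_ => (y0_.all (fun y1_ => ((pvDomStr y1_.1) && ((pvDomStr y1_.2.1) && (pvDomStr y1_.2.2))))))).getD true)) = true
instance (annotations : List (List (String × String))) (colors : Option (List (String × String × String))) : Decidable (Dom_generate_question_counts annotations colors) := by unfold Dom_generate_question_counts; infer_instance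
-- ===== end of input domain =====

-- B separates A's single interleaved loop into two passes — count first, then assign colors per distinct type — same values, same cost (objective: alternative decomposition).


-- shared input decoding: annotation['question_type'] (first-match assoc lookup; total under Pre_)
def pvQT (a : List (String × String)) : String := (List.lookup "question_type" a).getD ""

def pvCOLORS : List String := ["#e6194B", "#3cb44b", "#ffe119", "#4363d8", "#f58231", "#911eb4", "#42d4f4", "#f032e6",
  "#bfef45", "#fabed4", "#469990", "#dcbeff", "#9A6324", "#fffac8", "#800000", "#aaffc3",
  "#808000", "#ffd8b1", "#000075", "#a9a9a9", "#ffffff", "#000000"]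

-- ===== PORT A =====
-- one loop body of A: branch on presence in question_types, then on the colors condition
def pvStepA (colors : Option (List (String × String × String)))
    (st : PySem.Dict String (Int × String) × Int) (qt : String) :
    PySem.Dict String (Int × String) × Int :=
  match st.1.get? qt with
  | some (count, color) => (st.1.insert qt (count + 1, color), st.2)
  | none =>
    if colors = none ∨ qt ∉ (colors.getD []).map Prod.fst then
      (st.1.insert qt (1, PySem.List.pyGetD pvCOLORS st.2 ""), PySem.Int.mod (st.2 + 1) 22)
    else
      (st.1.insert qt (1, ((List.lookup qt (colors.getD [])).getD ("", "")).2), st.2)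

def generate_question_counts (annotations : List (List (String × String))) (colors : Option (List (String × String × String))) : List (String × Int × String) :=
  (annotations.foldl (fun st a => pvStepA colors st (pvQT a)) (PySem.Dict.empty, 0)).1.items

-- ===== PORT B =====
-- pass 1: counts[qt] = counts.get(qt, 0) + 1
def pvCounts (l : List String) : PySem.Dict String Int :=
  l.foldl (fun d x => d.insert x (d.getD x 0 + 1)) PySem.Dict.empty

-- pass 2 loop body: assign a color to one distinct question type
def pvStepC (colors : Option (List (String × String × String)))
    (st : PySem.Dict String String × Int) (qt : String) :
    PySem.Dict String String × Int :=
  if colors = none ∨ qt ∉ (colors.getD []).map Prod.fst then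
    (st.1.insert qt (PySem.List.pyGetD pvCOLORS st.2 ""), PySem.Int.mod (st.2 + 1) 22)
  else
    (st.1.insert qt (((List.lookup qt (colors.getD [])).getD ("", "")).2), st.2)

def pvColorFold (colors : Option (List (String × String × String))) (keys : List String) :
    PySem.Dict String String × Int :=
  keys.foldl (pvStepC colors) (PySem.Dict.empty, 0)

def generate_question_counts_alt (annotations : List (List (String × String))) (colors : Option (List (String × String × String))) : List (String × Int × String) :=
  let qts := annotations.map pvQT
  let counts := pvCounts qts
  let cf := pvColorFold colors counts.keys
  counts.items.map (fun p => (p.1, (p.2, cf.1.getD p.1 "")))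

-- ===== PRECONDITION & SPEC =====
-- Pre_ excludes annotations missing the key 'question_type', on which Python A raises KeyError.
def Pre_generate_question_counts (annotations : List (List (String × String))) (colors : Option (List (String × String × String))) : Prop :=
  ∀ a ∈ annotations, "question_type" ∈ a.map Prod.fst
instance (annotations : List (List (String × String))) (colors : Option (List (String × String × String))) : Decidable (Pre_generate_question_counts annotations colors) := by unfold Pre_generate_question_counts; infer_instance

def pvWitness_generate_question_counts : (List (List (String × String))) × (Option (List (String × String × String))) :=
  ([[("question_type", "what")], [("question_type", "why")]], some [("why", "x", "#123456")])

def Spec_generate_question_counts (annotations : List (List (String × String))) (colors : Option (List (String × String × String))) (out : List (String × Int × String)) : Prop := out = generate_question_counts_alt annotations colors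
instance (annotations : List (List (String × String))) (colors : Option (List (String × String × String))) (out : List (String × Int × String)) : Decidable (Spec_generate_question_counts annotations colors out) := by unfold Spec_generate_question_counts; infer_instance

-- ===== CLAIM (what is proved, stated in full; the proofs are below) =====
def Claim_equal_generate_question_counts : Prop := ∀ (annotations : List (List (String × String))) (colors : Option (List (String × String × String))), Dom_generate_question_counts annotations colors → Pre_generate_question_counts annotations colors → Spec_generate_question_counts annotations colors (generate_question_counts annotations colors)

-- ===== LEMMAS AND PROOFS =====
-- lookup in the summarized dict (items of C decorated with colors) in terms of lookup in C
theorem pv_get?_mk_map (its : List (String × Int)) (cm : PySem.Dict String String) (x : String) :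
    (PySem.Dict.mk (its.map (fun p => (p.1, (p.2, cm.getD p.1 ""))))).get? x
      = ((PySem.Dict.mk its).get? x).map (fun n => (n, cm.getD x "")) := by
  induction its with
  | nil => rfl
  | cons p rest ih =>
    obtain ⟨k, v⟩ := p
    simp only [List.map_cons, PySem.Dict.get?_mk_cons]
    by_cases h : k == x
    · have hk : k = x := beq_iff_eq.1 h
      subst hk; simp
    · simp [h, ih]

theorem pv_contains_mk_map (C : PySem.Dict String Int) (cm : PySem.Dict String String) (x : String) :
    (PySem.Dict.mk (C.items.map (fun p => (p.1, (p.2, cm.getD p.1 ""))))).contains x = C.contains x := by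
  rw [PySem.Dict.contains_eq_isSome_get?, PySem.Dict.contains_eq_isSome_get?,
    pv_get?_mk_map, Option.isSome_map]

-- one loop step of A, on the summarized state, equals B's summary of the extended counts
theorem pv_step_main (colors : Option (List (String × String × String)))
    (C : PySem.Dict String Int) (x : String) :
    pvStepA colors
        (PySem.Dict.mk (C.items.map (fun p => (p.1, (p.2, (pvColorFold colors C.keys).1.getD p.1 "")))),
         (pvColorFold colors C.keys).2) x
      = (PySem.Dict.mk ((C.insert x (C.getD x 0 + 1)).items.map
            (fun p => (p.1, (p.2, (pvColorFold colors (C.insert x (C.getD x 0 + 1)).keys).1.getD p.1 "")))),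
         (pvColorFold colors (C.insert x (C.getD x 0 + 1)).keys).2) := by
  have hmk : PySem.Dict.mk C.items = C := rfl
  cases hcx : C.contains x with
  | true =>
    obtain ⟨n, hn⟩ : ∃ n, C.get? x = some n := by
      have h := PySem.Dict.contains_eq_isSome_get? (d := C) (k := x)
      rw [hcx] at h
      exact Option.isSome_iff_exists.1 h.symm
    have hgd : C.getD x 0 = n := PySem.Dict.getD_of_get?_eq_some C 0 hn
    have hkeys : (C.insert x (C.getD x 0 + 1)).keys = C.keys :=
      PySem.Dict.keys_insert_of_contains C _ hcx
    rw [hkeys]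
    have hget : (PySem.Dict.mk (C.items.map
        (fun p => (p.1, ((p.2 : Int), (pvColorFold colors C.keys).1.getD p.1 ""))))).get? x
        = some (n, (pvColorFold colors C.keys).1.getD x "") := by
      rw [pv_get?_mk_map, hmk, hn]; rfl
    simp only [pvStepA, hget]
    refine Prod.ext ?_ rfl
    apply PySem.Dict.ext
    rw [PySem.Dict.items_insert_of_contains _ _ (by rw [pv_contains_mk_map]; exact hcx),
        PySem.Dict.items_insert_of_contains _ _ hcx]
    simp only [List.map_map]
    apply List.map_congr_left
    intro p hp
    by_cases h : p.1 == x
    · have hk : p.1 = x := beq_iff_eq.1 h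
      simp [Function.comp, hk, ← hgd]
    · simp [Function.comp, h]
  | false =>
    have hget0 : C.get? x = none := (PySem.Dict.get?_eq_none_iff_contains C x).2 hcx
    have hkeys : (C.insert x (C.getD x 0 + 1)).keys = C.keys ++ [x] :=
      PySem.Dict.keys_insert_of_not_contains C _ hcx
    have hval : C.getD x 0 = 0 := PySem.Dict.getD_of_not_contains C 0 hcx
    have hnotmem : x ∉ C.keys := by
      intro hmem
      rw [(PySem.Dict.contains_iff_mem_keys C x).2 hmem] at hcx
      cases hcx
    have hfold : pvColorFold colors (C.keys ++ [x])
        = pvStepC colors (pvColorFold colors C.keys) x := by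
      simp [pvColorFold, List.foldl_append]
    have hget : (PySem.Dict.mk (C.items.map
        (fun p => (p.1, ((p.2 : Int), (pvColorFold colors C.keys).1.getD p.1 ""))))).get? x
        = none := by
      rw [pv_get?_mk_map, hmk, hget0]; rfl
    rw [hkeys, hfold]
    simp only [pvStepA, pvStepC, hget]
    split_ifs with hcond
    all_goals
      refine Prod.ext ?_ rfl
      apply PySem.Dict.ext
      rw [PySem.Dict.items_insert_of_not_contains _ _ (by rw [pv_contains_mk_map]; exact hcx),
          PySem.Dict.items_insert_of_not_contains _ _ hcx]
      simp only [List.map_append, List.map_cons, List.map_nil]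
      refine congrArg₂ (· ++ ·) ?_ ?_
      · apply List.map_congr_left
        intro p hp
        have hne : p.1 ≠ x := fun h => hnotmem (h ▸ PySem.Dict.mem_keys_of_mem_items C hp)
        rw [PySem.Dict.getD_insert_of_ne _ _ _ hne]
      · rw [hval, PySem.Dict.getD_insert_self]
        norm_num

-- the central invariant: A's loop state after any prefix equals B's two-pass summary of that prefix
theorem pv_inv (colors : Option (List (String × String × String))) (l : List String) :
    l.foldl (pvStepA colors) (PySem.Dict.empty, 0)
      = (PySem.Dict.mk ((pvCounts l).items.map
            (fun p => (p.1, (p.2, (pvColorFold colors (pvCounts l).keys).1.getD p.1 "")))),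
         (pvColorFold colors (pvCounts l).keys).2) := by
  induction l using List.reverseRecOn with
  | nil => rfl
  | append_singleton l x ih =>
    have hC' : pvCounts (l ++ [x]) = (pvCounts l).insert x ((pvCounts l).getD x 0 + 1) := by
      simp [pvCounts, List.foldl_append]
    rw [List.foldl_append, ih, hC', List.foldl_cons, List.foldl_nil, pv_step_main colors _ x]

-- ===== VERDICT (by name: the statement is the Claim_ definition above) =====
theorem generate_question_counts_spec : Claim_equal_generate_question_counts := by
  intro annotations colors _ _
  unfold Spec_generate_question_counts generate_question_counts generate_question_counts_alt
  rw [← List.foldl_map, pv_inv]
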